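-- pv_equiv track=rewrite | github.com/AjayMaan13/my-leetcode-journey | Extra/heap/03-element-rank-in-array.py | replaceWithRank
-- ===== SOURCE A (Python) =====
-- def replaceWithRank(arr):
--     result = []
--
--     for i in range(len(arr)):
--         smaller = set()
--
--         for j in range(len(arr)):
--             if arr[j] < arr[i]:
--                 smaller.add(arr[j])  # keep only unique values
--
--         rank = len(smaller) + 1
--         result.append(rank)
--
--     return result
-- ===== SOURCE B (Python) =====
-- def replaceWithRank(arr):
--     vals = sorted(set(arr))
--     rank = {v: i + 1 for i, v in enumerate(vals)}
--     return [rank[v] for v in arr]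
-- ===== Notes on version B (the rewrite author's own statement) =====
-- stated objective: faster
-- what changed: Replaces the per-element O(n) distinct-smaller scan (a fresh set built for every index) by sorting the distinct values once and looking each element's dense rank up in a dict.
import Mathlib
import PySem

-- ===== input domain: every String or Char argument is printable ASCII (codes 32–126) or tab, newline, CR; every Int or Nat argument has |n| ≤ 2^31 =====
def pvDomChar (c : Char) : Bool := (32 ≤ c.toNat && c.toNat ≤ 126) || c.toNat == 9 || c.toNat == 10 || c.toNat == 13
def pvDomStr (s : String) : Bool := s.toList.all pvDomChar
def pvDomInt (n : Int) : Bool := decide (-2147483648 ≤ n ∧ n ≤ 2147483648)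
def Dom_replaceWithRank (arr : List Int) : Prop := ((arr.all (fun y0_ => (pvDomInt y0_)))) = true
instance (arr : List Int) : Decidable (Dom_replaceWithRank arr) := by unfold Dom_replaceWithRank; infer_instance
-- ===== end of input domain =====

-- B replaces A's per-element rebuild of the set of distinct smaller values by one sort of the
-- distinct values plus a rank dictionary (objective: faster, O(n^2) -> O(n log n)).

-- ===== PORT A =====
-- for i in range(len(arr)): build 'smaller' by scanning all of arr, append len(smaller)+1
def replaceWithRank (arr : List Int) : List Int :=
  arr.foldl
    (fun result x =>
      let smaller : PySem.Set Int :=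
        arr.foldl (fun s y => if y < x then PySem.Set.add s y else s) PySem.Set.empty
      let rank : Int := PySem.Set.len smaller + 1
      result ++ [rank])
    []

-- ===== PORT B =====
-- vals = sorted(set(arr)); rank = {v: i+1 for i, v in enumerate(vals)}; [rank[v] for v in arr]
-- rank[v] never raises (every v of arr is a key); the lookup is ported as getD with default 0.
def replaceWithRank_alt (arr : List Int) : List Int :=
  let vals : List Int := PySem.List.sorted (PySem.Set.ofList arr) (fun x => x) false
  let rank : PySem.Dict Int Int :=
    (PySem.List.enumerate vals 0).foldl
      (fun d p => PySem.Dict.insert d p.2 (p.1 + 1)) PySem.Dict.empty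
  arr.map (fun v => PySem.Dict.getD rank v 0)

-- ===== PRECONDITION & SPEC =====
def Spec_replaceWithRank (arr : List Int) (out : List Int) : Prop := out = replaceWithRank_alt arr
instance (arr : List Int) (out : List Int) : Decidable (Spec_replaceWithRank arr out) := by unfold Spec_replaceWithRank; infer_instance

-- ===== CLAIM (what is proved, stated in full; the proofs are below) =====
def Claim_equal_replaceWithRank : Prop := ∀ (arr : List Int), Dom_replaceWithRank arr → Spec_replaceWithRank arr (replaceWithRank arr)

-- ===== LEMMAS AND PROOFS =====

-- an append-accumulator loop is a map
theorem foldl_app (f : Int → Int) (acc : List Int) (l : List Int) :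
    l.foldl (fun r x => r ++ [f x]) acc = acc ++ l.map f := by
  induction l generalizing acc with
  | nil => simp
  | cons x xs ih => simp [List.foldl, ih]

-- A's inner loop builds set(filter)
theorem set_fold_filter (x : Int) (xs : List Int) (s : PySem.Set Int) :
    xs.foldl (fun s y => if y < x then PySem.Set.add s y else s) s
      = PySem.Set.update s (xs.filter (fun y => decide (y < x))) := by
  induction xs generalizing s with
  | nil => rfl
  | cons y ys ih =>
    by_cases h : y < x
    · simp [List.foldl, List.filter, h, PySem.Set.update_cons, ih]
    · simp [List.foldl, List.filter, h, ih]

-- two nodup lists with the same members have the same length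
theorem length_eq_of_nodup_of_mem_iff (l₁ l₂ : List Int)
    (h₁ : l₁.Nodup) (h₂ : l₂.Nodup) (hm : ∀ x, x ∈ l₁ ↔ x ∈ l₂) :
    l₁.length = l₂.length := by
  rw [← List.toFinset_card_of_nodup h₁, ← List.toFinset_card_of_nodup h₂]
  congr 1
  ext a
  simp [hm]

-- in a strictly increasing list, the number of elements below l[k] is k
theorem filter_lt_length_of_strict (l : List Int) (hs : l.Pairwise (· < ·))
    (k : Nat) (hk : k < l.length) :
    (l.filter (fun y => decide (y < l[k]))).length = k := by
  have hget := List.pairwise_iff_getElem.mp hs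
  have hsplit : l = l.take k ++ l.drop k := (List.take_append_drop k l).symm
  have htake : (l.take k).filter (fun y => decide (y < l[k])) = l.take k := by
    apply List.filter_eq_self.mpr
    intro a ha
    rw [List.mem_iff_getElem] at ha
    obtain ⟨i, hi, hai⟩ := ha
    have hik : i < k := by
      have := List.length_take_le k l
      omega
    have hil : i < l.length := by omega
    have hai' : a = l[i] := by rw [← hai]; simp [List.getElem_take]
    rw [hai']
    exact decide_eq_true (hget i k hil hk hik)
  have hdrop : (l.drop k).filter (fun y => decide (y < l[k])) = [] := by
    apply List.filter_eq_nil_iff.mpr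
    intro a ha
    rw [List.mem_iff_getElem] at ha
    obtain ⟨i, hi, hai⟩ := ha
    have hki : k + i < l.length := by
      rw [List.length_drop] at hi; omega
    have hai' : a = l[k + i] := by rw [← hai]; simp [List.getElem_drop]
    rw [hai']
    simp only [decide_eq_true_eq]
    rcases Nat.eq_zero_or_pos i with h0 | h0
    · subst h0; simp
    · have := hget k (k + i) hk hki (by omega)
      omega
  calc (l.filter (fun y => decide (y < l[k]))).length
      = ((l.take k ++ l.drop k).filter (fun y => decide (y < l[k]))).length := by rw [← hsplit]
    _ = k := by
        rw [List.filter_append, htake, hdrop]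
        simp [List.length_take]
        omega

theorem replaceWithRank_spec_aux (arr : List Int) :
    replaceWithRank arr = replaceWithRank_alt arr := by
  have hA : replaceWithRank arr
      = arr.map (fun x =>
          PySem.Set.len (PySem.Set.ofList (arr.filter (fun y => decide (y < x)))) + 1) := by
    unfold replaceWithRank
    show arr.foldl (fun r x => r ++
        [PySem.Set.len (arr.foldl (fun s y => if y < x then PySem.Set.add s y else s)
            PySem.Set.empty) + 1]) [] = _
    rw [foldl_app]
    simp only [List.nil_append]
    apply List.map_congr_left
    intro x _
    rw [set_fold_filter]
    rw [show (PySem.Set.empty : PySem.Set Int) = ([] : PySem.Set Int) from rfl, PySem.Set.update_nil_left]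
  rw [hA]
  unfold replaceWithRank_alt
  simp only []
  apply List.map_congr_left
  intro x hx
  set vals : List Int := PySem.List.sorted (PySem.Set.ofList arr) (fun x => x) false with hvals
  have hperm : vals.Perm (PySem.Set.ofList arr) := PySem.List.sorted_perm _ _ _
  have hnodupv : vals.Nodup := hperm.nodup_iff.mpr (PySem.Set.nodup_ofList arr)
  have hmemv : ∀ a, a ∈ vals ↔ a ∈ arr := by
    intro a; rw [hperm.mem_iff, PySem.Set.mem_ofList]
  have hsorted : vals.Pairwise (· < ·) := PySem.List.sorted_ofList_pairwise_lt arr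
  have hfresh : ∀ p ∈ PySem.List.enumerate vals 0,
      (PySem.Dict.empty : PySem.Dict Int Int).contains p.2 = false := by
    intro p _; simp
  have hkeys : ((PySem.List.enumerate vals 0).map (·.2)).Nodup := by
    rw [PySem.List.map_snd_enumerate]; exact hnodupv
  have hitems :
      ((PySem.List.enumerate vals 0).foldl
        (fun d p => PySem.Dict.insert d p.2 (p.1 + 1)) PySem.Dict.empty).items
      = (PySem.List.enumerate vals 0).map (fun p => (p.2, p.1 + 1)) := by
    rw [PySem.Dict.items_foldl_insert_fresh _ _ _ _ hfresh hkeys]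
    simp [PySem.Dict.empty]
  have hxv : x ∈ vals := (hmemv x).mpr hx
  rw [List.mem_iff_getElem] at hxv
  obtain ⟨k, hk, hxk⟩ := hxv
  have hitem : (x, (k : Int) + 1) ∈
      ((PySem.List.enumerate vals 0).foldl
        (fun d p => PySem.Dict.insert d p.2 (p.1 + 1)) PySem.Dict.empty).items := by
    rw [hitems]
    refine List.mem_map.mpr ⟨((k : Int), x), ?_, rfl⟩
    rw [PySem.List.mem_enumerate_iff]
    exact ⟨k, hk, by simp [hxk]⟩
  have hnkeys : ((PySem.List.enumerate vals 0).foldl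
        (fun d p => PySem.Dict.insert d p.2 (p.1 + 1)) PySem.Dict.empty).keys.Nodup := by
    simp only [PySem.Dict.keys, hitems, List.map_map]
    rw [show ((fun x : Int × Int => x.1) ∘ fun p : Int × Int => (p.2, p.1 + 1)) = (fun p : Int × Int => p.2) from funext (fun p => rfl), PySem.List.map_snd_enumerate]
    exact hnodupv
  rw [PySem.Dict.getD_of_mem_items _ hitem hnkeys 0]
  have hlen : (PySem.Set.ofList (arr.filter (fun y => decide (y < x)))).length
      = (vals.filter (fun y => decide (y < x))).length := by
    apply length_eq_of_nodup_of_mem_iff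
    · exact PySem.Set.nodup_ofList _
    · exact List.Nodup.filter _ hnodupv
    · intro a
      simp only [PySem.Set.mem_ofList, List.mem_filter]
      exact and_congr_left' (hmemv a).symm
  have hcount : (vals.filter (fun y => decide (y < x))).length = k := by
    have := filter_lt_length_of_strict vals hsorted k hk
    rw [hxk] at this
    exact this
  simp [PySem.Set.len, hlen, hcount]

-- ===== VERDICT (by name: the statement is the Claim_ definition above) =====
theorem replaceWithRank_spec : Claim_equal_replaceWithRank := by
  intro arr _
  unfold Spec_replaceWithRank
  exact replaceWithRank_spec_aux arr
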